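-- pv_equiv track=rewrite | github.com/equinor/webviz | backend_py/primary/primary/services/summary_total_vectors.py | is_total_vector
-- ===== SOURCE A (Python) =====
-- TOTAL_VARS = [
--     "OPT",
--     "GPT",
--     "WPT",
--     "GIT",
--     "WIT",
--     "OPTF",
--     "OPTS",
--     "OIT",
--     "OVPT",
--     "OVIT",
--     "MWT",
--     "WVPT",
--     "WVIT",
--     "GMT",
--     "GPTF",
--     "SGT",
--     "GST",
--     "FGT",
--     "GCT",
--     "GIMT",
--     "WGPT",
--     "WGIT",
--     "EGT",
--     "EXGT",
--     "GVPT",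
--     "GVIT",
--     "LPT",
--     "VPT",
--     "VIT",
--     "NPT",
--     "NIT",
--     "CPT",
--     "CIT",
-- ]
--
-- def is_total_vector(vector_name: str, delimiter: str = ":") -> bool:
--     """
--     Check if a vector is a total vector.
--
--     Provide vector name, which is vector base name (WOPT, WOPR, FOPT, GOPR, ...) and vector node name (well, group, region, etc)
--     separated by delimiter.
--
--     Based on `bool smspec_node_identify_total()` in resdata/lib/ecl/smspec_node.cpp:
--     https://github.com/equinor/resdata/blob/f82318a84bbefb6a53ed674a04eb2a73d89de02d/lib/ecl/smspec_node.cpp#L315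
--     """
--
--     split = vector_name.split(delimiter)
--     if len(split) < 1:
--         return False
--
--     vector_base_name = split[0]
--     if len(vector_base_name) < 1:
--         return False
--
--     # Do not include leading "W", "G" or "F" for comparison
--     vector_base_substring = vector_base_name[1:]
--
--     # All TOTAL_VARS element greater or equal to 3 characters
--     if len(vector_base_substring) < 3:
--         return False
--
--     # Check if a total_var is substring of vector_base_substring, to ensure trailing H (historical vector) is also considered
--     return any(total_var in vector_base_substring for total_var in TOTAL_VARS)
-- ===== SOURCE B (Python) =====
-- TOTAL_VARS = [
--     "OPT", "GPT", "WPT", "GIT", "WIT", "OPTF", "OPTS", "OIT", "OVPT", "OVIT",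
--     "MWT", "WVPT", "WVIT", "GMT", "GPTF", "SGT", "GST", "FGT", "GCT", "GIMT",
--     "WGPT", "WGIT", "EGT", "EXGT", "GVPT", "GVIT", "LPT", "VPT", "VIT", "NPT",
--     "NIT", "CPT", "CIT",
-- ]
--
-- TOTAL_SET = set(TOTAL_VARS)
-- LENGTHS = sorted({len(v) for v in TOTAL_VARS})  # [3, 4]
--
--
-- def is_total_vector(vector_name: str, delimiter: str = ":") -> bool:
--     split = vector_name.split(delimiter)
--     if len(split) < 1:
--         return False
--
--     vector_base_name = split[0]
--     if len(vector_base_name) < 1: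
--         return False
--
--     vector_base_substring = vector_base_name[1:]
--     if len(vector_base_substring) < 3:
--         return False
--
--     # Scan input windows (every start position, every pattern length) against a hash set
--     for i in range(len(vector_base_substring)):
--         for length in LENGTHS:
--             if vector_base_substring[i : i + length] in TOTAL_SET:
--                 return True
--     return False
-- ===== Notes on version B (the rewrite author's own statement) =====
-- stated objective: idiomatic
-- what changed: Instead of testing each of the 33 patterns for containment in the substring, B precomputes a hash set of the patterns and their length set {3,4} and scans every window of the input substring once, returning True on the first window found in the set.
import Mathlib
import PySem

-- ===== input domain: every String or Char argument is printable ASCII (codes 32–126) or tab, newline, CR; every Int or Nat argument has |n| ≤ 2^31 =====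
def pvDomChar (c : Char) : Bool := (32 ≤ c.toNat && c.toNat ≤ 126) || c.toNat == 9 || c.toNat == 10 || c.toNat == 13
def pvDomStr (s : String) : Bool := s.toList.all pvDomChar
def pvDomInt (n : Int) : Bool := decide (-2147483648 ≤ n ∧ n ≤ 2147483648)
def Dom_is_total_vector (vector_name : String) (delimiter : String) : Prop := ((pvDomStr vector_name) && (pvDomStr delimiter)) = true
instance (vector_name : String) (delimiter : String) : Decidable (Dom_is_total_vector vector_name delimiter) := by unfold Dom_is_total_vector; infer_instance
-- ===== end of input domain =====

-- B replaces A's per-pattern containment scan by a single scan over input windows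
-- (each start index, pattern lengths {3,4}) against a precomputed hash set (idiomatic).


-- ===== PORT A =====
def TOTAL_VARS : List String :=
  ["OPT", "GPT", "WPT", "GIT", "WIT", "OPTF", "OPTS", "OIT", "OVPT", "OVIT",
   "MWT", "WVPT", "WVIT", "GMT", "GPTF", "SGT", "GST", "FGT", "GCT", "GIMT",
   "WGPT", "WGIT", "EGT", "EXGT", "GVPT", "GVIT", "LPT", "VPT", "VIT", "NPT",
   "NIT", "CPT", "CIT"]

def is_total_vector (vector_name : String) (delimiter : String) : Bool :=
  match PySem.Str.split? vector_name delimiter with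
  | none => false   -- delimiter = "": Python raises ValueError (excluded by Pre_)
  | some split =>
    if split.length < 1 then false
    else
      let vector_base_name := PySem.List.pyGetD split 0 ""
      if PySem.Str.len vector_base_name < 1 then false
      else
        let vector_base_substring := PySem.Str.slice vector_base_name (some 1) none
        if PySem.Str.len vector_base_substring < 3 then false
        else TOTAL_VARS.any (fun total_var => PySem.Str.isIn total_var vector_base_substring)

-- ===== PORT B =====
def TOTAL_SET : PySem.Set String := PySem.Set.ofList TOTAL_VARS
def LENGTHS : List Int :=
  PySem.List.sorted (PySem.Set.ofList (TOTAL_VARS.map (fun v => PySem.Str.len v))) (fun x => x)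

def is_total_vector_alt (vector_name : String) (delimiter : String) : Bool :=
  match PySem.Str.split? vector_name delimiter with
  | none => false   -- delimiter = "": Python raises ValueError (excluded by Pre_)
  | some split =>
    if split.length < 1 then false
    else
      let vector_base_name := PySem.List.pyGetD split 0 ""
      if PySem.Str.len vector_base_name < 1 then false
      else
        let vector_base_substring := PySem.Str.slice vector_base_name (some 1) none
        if PySem.Str.len vector_base_substring < 3 then false
        else
          (PySem.List.pyRange 0 (PySem.Str.len vector_base_substring) 1).any (fun i =>
            LENGTHS.any (fun length =>
              PySem.Set.contains TOTAL_SET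
                (PySem.Str.slice vector_base_substring (some i) (some (i + length)))))

-- ===== PRECONDITION & SPEC =====
-- Pre_ excludes only the empty delimiter, on which Python's str.split raises ValueError.
def Pre_is_total_vector (_vector_name : String) (delimiter : String) : Prop := delimiter ≠ ""
instance (vector_name : String) (delimiter : String) : Decidable (Pre_is_total_vector vector_name delimiter) := by unfold Pre_is_total_vector; infer_instance
def pvWitness_is_total_vector : String × String := ("FOPT:OP_1", ":")
def Spec_is_total_vector (vector_name : String) (delimiter : String) (out : Bool) : Prop := out = is_total_vector_alt vector_name delimiter
instance (vector_name : String) (delimiter : String) (out : Bool) : Decidable (Spec_is_total_vector vector_name delimiter out) := by unfold Spec_is_total_vector; infer_instance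

-- ===== CLAIM (what is proved, stated in full; the proofs are below) =====
def Claim_equal_is_total_vector : Prop := ∀ (vector_name : String) (delimiter : String), Dom_is_total_vector vector_name delimiter → Pre_is_total_vector vector_name delimiter → Spec_is_total_vector vector_name delimiter (is_total_vector vector_name delimiter)

-- ===== LEMMAS AND PROOFS =====

theorem lengths_eq : LENGTHS = [3, 4] := by decide

theorem total_vars_lengths : ∀ t ∈ TOTAL_VARS, t.toList.length = 3 ∨ t.toList.length = 4 := by decide

theorem windows_eq_contains (s : String) :
    TOTAL_VARS.any (fun t => PySem.Str.isIn t s)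
      = (PySem.List.pyRange 0 (PySem.Str.len s) 1).any (fun i =>
          LENGTHS.any (fun L =>
            PySem.Set.contains TOTAL_SET (PySem.Str.slice s (some i) (some (i + L))))) := by
  rw [Bool.eq_iff_iff]
  simp only [List.any_eq_true, PySem.Set.contains_iff, PySem.List.mem_pyRange_one]
  constructor
  · rintro ⟨t, ht, hin⟩
    obtain ⟨pre, suf, hl⟩ := (PySem.Str.isIn_iff_infix t s).mp hin
    have hlen := total_vars_lengths t ht
    refine ⟨(pre.length : Int), ⟨by positivity, ?_⟩, (t.toList.length : Int), ?_, ?_⟩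
    · have hlth : s.toList.length = pre.length + t.toList.length + suf.length := by
        rw [← hl, List.length_append, List.length_append]
      rw [PySem.Str.len_eq]
      omega
    · rw [lengths_eq]
      rcases hlen with h | h <;> rw [h] <;> simp
    · rw [show TOTAL_SET = PySem.Set.ofList TOTAL_VARS from rfl, PySem.Set.mem_ofList]
      have hw : (PySem.Str.slice s (some (pre.length : Int))
          (some ((pre.length : Int) + (t.toList.length : Int)))).toList = t.toList := by
        rw [PySem.Str.toList_slice, PySem.Chars.slice_eq_listSlice, PySem.List.slice_natCast_add, ← hl,
          List.append_assoc, List.drop_left, List.take_left]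
      have heq : PySem.Str.slice s (some (pre.length : Int))
          (some ((pre.length : Int) + (t.toList.length : Int))) = t := String.toList_inj.mp hw
      rw [heq]
      exact ht
  · rintro ⟨i, ⟨hi0, hilt⟩, L, hL, hmem⟩
    rw [show TOTAL_SET = PySem.Set.ofList TOTAL_VARS from rfl, PySem.Set.mem_ofList] at hmem
    refine ⟨_, hmem, ?_⟩
    rw [PySem.Str.isIn_iff_infix, PySem.Str.toList_slice, PySem.Chars.slice_eq_listSlice]
    have hL0 : 0 ≤ L := by rw [lengths_eq] at hL; simp at hL; rcases hL with h | h <;> omega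
    rw [PySem.List.slice_toNat s.toList hi0 (by omega : (0:Int) ≤ i + L)]
    exact ((List.take_prefix _ _).isInfix).trans (List.drop_suffix _ _).isInfix

-- ===== VERDICT (by name: the statement is the Claim_ definition above) =====
theorem is_total_vector_spec : Claim_equal_is_total_vector := by
  intro vn d _ hpre
  unfold Spec_is_total_vector is_total_vector is_total_vector_alt
  cases hsplit : PySem.Str.split? vn d with
  | none => rfl
  | some split =>
    simp only
    split_ifs with h1 h2 h3
    · rfl
    · rfl
    · rfl
    · exact windows_eq_contains _
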